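-- pv_equiv track=rewrite | github.com/MGokhanGuldas/PERI | peri_V1/scripts/export_run_inventory.py | _ordered_columns
-- ===== SOURCE A (Python) =====
-- from typing import Any
--
-- def _ordered_columns(rows: list[dict[str, Any]]) -> list[str]:
--     preferred = [
--         "run_root_relative",
--         "mode",
--         "experiment_name",
--         "run_name",
--         "model_name",
--         "status",
--         "reason_training_ended",
--         "best_val_map",
--         "best_val_epoch",
--         "best_val_vad_error",
--         "test_map",
--         "test_precision",
--         "test_recall",
--         "test_f1",
--         "test_vad_error",
--         "derived__best_ap_label",
--         "derived__best_ap_value",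
--         "derived__worst_ap_label",
--         "derived__worst_ap_value",
--         "run_root",
--         "has_run_config",
--         "has_summary",
--         "has_final_metrics",
--         "has_dataset_summary",
--         "has_training_history",
--     ]
--     all_columns = set()
--     for row in rows:
--         all_columns.update(row.keys())
--     ordered = [column for column in preferred if column in all_columns]
--     remaining = sorted(column for column in all_columns if column not in set(ordered))
--     return ordered + remaining
-- ===== SOURCE B (Python) =====
-- from typing import Any
--
-- def _ordered_columns(rows: list[dict[str, Any]]) -> list[str]:
--     preferred = [
--         "run_root_relative",
--         "mode",
--         "experiment_name",
--         "run_name",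
--         "model_name",
--         "status",
--         "reason_training_ended",
--         "best_val_map",
--         "best_val_epoch",
--         "best_val_vad_error",
--         "test_map",
--         "test_precision",
--         "test_recall",
--         "test_f1",
--         "test_vad_error",
--         "derived__best_ap_label",
--         "derived__best_ap_value",
--         "derived__worst_ap_label",
--         "derived__worst_ap_value",
--         "run_root",
--         "has_run_config",
--         "has_summary",
--         "has_final_metrics",
--         "has_dataset_summary",
--         "has_training_history",
--     ]
--     rank = {column: index for index, column in enumerate(preferred)}
--     all_columns = set()
--     for row in rows:
--         all_columns.update(row.keys())
--     return sorted(all_columns, key=lambda c: (rank.get(c, len(preferred)), c))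
-- ===== Notes on version B (the rewrite author's own statement) =====
-- stated objective: idiomatic
-- what changed: Replaces A's two-phase filter-then-sort concatenation with a single keyed sort over all columns, using a precomputed rank dict and the composite key (rank.get(c, len(preferred)), c).
import Mathlib
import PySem

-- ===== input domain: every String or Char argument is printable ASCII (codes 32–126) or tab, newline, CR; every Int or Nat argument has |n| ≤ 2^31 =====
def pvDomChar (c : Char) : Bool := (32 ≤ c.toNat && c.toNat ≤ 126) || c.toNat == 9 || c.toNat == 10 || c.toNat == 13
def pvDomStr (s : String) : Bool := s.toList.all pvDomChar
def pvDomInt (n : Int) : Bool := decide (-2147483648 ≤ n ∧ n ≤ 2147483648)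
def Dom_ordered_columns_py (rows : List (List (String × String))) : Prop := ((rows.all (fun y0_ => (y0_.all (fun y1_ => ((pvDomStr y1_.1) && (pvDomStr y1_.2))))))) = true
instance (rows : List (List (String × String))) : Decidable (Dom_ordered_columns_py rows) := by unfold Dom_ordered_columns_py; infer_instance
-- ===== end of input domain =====

-- B replaces A's filter-then-sort-then-append with one keyed sort (rank dict + composite key); same result, similar cost (objective: idiomatic).

-- the shared literal `preferred` list of both Python sources
def pvPreferred : List String :=
  ["run_root_relative",
   "mode",
   "experiment_name",
   "run_name",
   "model_name",
   "status",
   "reason_training_ended",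
   "best_val_map",
   "best_val_epoch",
   "best_val_vad_error",
   "test_map",
   "test_precision",
   "test_recall",
   "test_f1",
   "test_vad_error",
   "derived__best_ap_label",
   "derived__best_ap_value",
   "derived__worst_ap_label",
   "derived__worst_ap_value",
   "run_root",
   "has_run_config",
   "has_summary",
   "has_final_metrics",
   "has_dataset_summary",
   "has_training_history"]

-- ===== PORT A =====
def ordered_columns_py (rows : List (List (String × String))) : List String :=
  let all_columns : PySem.Set String :=
    rows.foldl (fun s row => PySem.Set.update s (PySem.Dict.mk row).keys) PySem.Set.empty
  let ordered : List String := pvPreferred.filter (fun column => PySem.Set.contains all_columns column)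
  let remaining : List String :=
    PySem.List.sorted (all_columns.filter
      (fun column => !(PySem.Set.contains (PySem.Set.ofList ordered) column))) (fun x => x) false
  ordered ++ remaining

-- ===== PORT B =====
-- rank = {column: index for index, column in enumerate(preferred)}
def pvRank : PySem.Dict String Int :=
  (PySem.List.enumerate pvPreferred).foldl (fun d p => d.insert p.2 p.1) PySem.Dict.empty

-- the key tuple (rank.get(c, len(preferred)), c) is ported as the lexicographic pair key of sorted2
def ordered_columns_py_alt (rows : List (List (String × String))) : List String :=
  let all_columns : PySem.Set String :=
    rows.foldl (fun s row => PySem.Set.update s (PySem.Dict.mk row).keys) PySem.Set.empty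
  PySem.List.sorted2 all_columns
    (fun c => pvRank.getD c (PySem.List.len pvPreferred)) (fun c => c) false

-- ===== PRECONDITION & SPEC =====
def Spec_ordered_columns_py (rows : List (List (String × String))) (out : List String) : Prop := out = ordered_columns_py_alt rows
instance (rows : List (List (String × String))) (out : List String) : Decidable (Spec_ordered_columns_py rows out) := by unfold Spec_ordered_columns_py; infer_instance

-- ===== CLAIM (what is proved, stated in full; the proofs are below) =====
def Claim_equal_ordered_columns_py : Prop := ∀ (rows : List (List (String × String))), Dom_ordered_columns_py rows → Spec_ordered_columns_py rows (ordered_columns_py rows)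

-- ===== LEMMAS AND PROOFS =====

-- B's composite key, as one lexicographic key
def pvKey (c : String) : Lex (Int × String) := toLex (pvRank.getD c (PySem.List.len pvPreferred), c)

-- sorted2 with two linearly ordered keys IS sorted with the lexicographic pair key
theorem pv_sorted2_eq_sorted_lex {α κ₁ κ₂ : Type} [LinearOrder κ₁] [LinearOrder κ₂]
    (xs : List α) (k1 : α → κ₁) (k2 : α → κ₂) :
    PySem.List.sorted2 xs k1 k2 false = PySem.List.sorted xs (fun x => toLex (k1 x, k2 x)) false := by
  have h : (fun a b => decide (k1 a < k1 b) || (!decide (k1 b < k1 a) && decide (k2 a < k2 b)))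
      = (fun a b => decide ((toLex (k1 a, k2 a) : Lex (κ₁ × κ₂)) < toLex (k1 b, k2 b))) := by
    funext a b
    rcases lt_trichotomy (k1 a) (k1 b) with h1 | h1 | h1
    · simp [h1, Prod.Lex.toLex_lt_toLex]
    · simp [h1, Prod.Lex.toLex_lt_toLex]
    · simp [h1, h1.asymm, h1.ne', Prod.Lex.toLex_lt_toLex]
  rw [PySem.List.sorted_eq_foldl_insertBy]
  show List.foldl (fun acc x => PySem.List.insertBy
      (fun a b => decide (k1 a < k1 b) || (!decide (k1 b < k1 a) && decide (k2 a < k2 b))) x acc) [] xs = _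
  rw [h]

theorem pv_nodup_pref : pvPreferred.Nodup := by decide

theorem pv_rank_lt_of_mem : ∀ c ∈ pvPreferred, pvRank.getD c (PySem.List.len pvPreferred) < 25 := by decide

theorem pv_rank_pairwise :
    pvPreferred.Pairwise (fun a b => pvRank.getD a (PySem.List.len pvPreferred) < pvRank.getD b (PySem.List.len pvPreferred)) := by
  decide

theorem pv_keys_rank : pvRank.keys = pvPreferred := by decide

theorem pv_rank_of_not_mem (c : String) (h : c ∉ pvPreferred) :
    pvRank.getD c (PySem.List.len pvPreferred) = 25 := by
  have hc : pvRank.contains c = false := by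
    rw [PySem.Dict.contains_eq_decide_mem_keys, pv_keys_rank]
    simpa using h
  rw [PySem.Dict.getD_of_not_contains _ _ hc]
  decide

theorem pv_nodup_all (rows : List (List (String × String))) :
    (rows.foldl (fun s row => PySem.Set.update s (PySem.Dict.mk row).keys) PySem.Set.empty).Nodup := by
  suffices h : ∀ (rows : List (List (String × String))) (s : PySem.Set String), s.Nodup →
      (rows.foldl (fun s row => PySem.Set.update s (PySem.Dict.mk row).keys) s).Nodup by
    exact h rows PySem.Set.empty List.nodup_nil
  intro rows
  induction rows with
  | nil => intro s hs; simpa using hs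
  | cons r t ih => intro s hs; exact ih _ (PySem.Set.nodup_update s _ hs)

theorem pv_main (rows : List (List (String × String))) :
    ordered_columns_py rows = ordered_columns_py_alt rows := by
  set S := rows.foldl (fun s row => PySem.Set.update s (PySem.Dict.mk row).keys) PySem.Set.empty with hS
  have hSnd : S.Nodup := pv_nodup_all rows
  set ordered := pvPreferred.filter (fun column => PySem.Set.contains S column) with hordered
  show ordered ++ PySem.List.sorted (S.filter
      (fun column => !(PySem.Set.contains (PySem.Set.ofList ordered) column))) (fun x => x) false
    = PySem.List.sorted2 S (fun c => pvRank.getD c (PySem.List.len pvPreferred)) (fun c => c) false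
  -- membership characterisation of `ordered`
  have hmem_ord : ∀ c, c ∈ ordered ↔ c ∈ pvPreferred ∧ c ∈ S := by
    intro c
    constructor
    · intro h
      have h' := List.mem_filter.mp (hordered ▸ h)
      exact ⟨h'.1, (PySem.Set.contains_iff S c).mp h'.2⟩
    · intro h
      rw [hordered]
      exact List.mem_filter.mpr ⟨h.1, (PySem.Set.contains_iff S c).mpr h.2⟩
  -- A's `remaining` filter tests exactly "not preferred" on the elements of S
  have hfilter : S.filter (fun column => !(PySem.Set.contains (PySem.Set.ofList ordered) column))
      = S.filter (fun c => !(decide (c ∈ pvPreferred))) := by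
    apply List.filter_congr
    intro c hc
    by_cases hp : c ∈ pvPreferred
    · have h1 : PySem.Set.contains (PySem.Set.ofList ordered) c = true :=
        (PySem.Set.contains_iff _ c).mpr ((PySem.Set.mem_ofList _ _).mpr ((hmem_ord c).mpr ⟨hp, hc⟩))
      rw [h1]; simp [hp]
    · have h1 : PySem.Set.contains (PySem.Set.ofList ordered) c = false := by
        cases hcc : PySem.Set.contains (PySem.Set.ofList ordered) c
        · rfl
        · exact absurd ((hmem_ord c).mp ((PySem.Set.mem_ofList _ _).mp
            ((PySem.Set.contains_iff _ c).mp hcc))).1 hp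
      rw [h1]; simp [hp]
  rw [hfilter]
  set remaining := PySem.List.sorted (S.filter (fun c => !(decide (c ∈ pvPreferred)))) (fun x => x) false with hrem
  -- bridge B to a single lexicographic sort, then use the strict-pairwise characterisation
  rw [pv_sorted2_eq_sorted_lex]
  have hrem_sub : ∀ c ∈ remaining, c ∈ S ∧ c ∉ pvPreferred := by
    intro c hc
    have h1 := (PySem.List.mem_sorted _ _ _ _).mp (hrem ▸ hc)
    have h2 := List.mem_filter.mp h1
    exact ⟨h2.1, by simpa using h2.2⟩
  refine (PySem.List.sorted_eq_of_perm_of_pairwise_lt S (ordered ++ remaining)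
    (fun c => toLex (pvRank.getD c (PySem.List.len pvPreferred), c)) ?_ ?_).symm
  · -- permutation: ordered ++ remaining is S split by membership in `preferred`
    have hperm_rem : remaining.Perm (S.filter (fun c => !(decide (c ∈ pvPreferred)))) :=
      PySem.List.sorted_perm _ _ _
    have hord_nodup : ordered.Nodup := hordered ▸ pv_nodup_pref.filter _
    have hperm_ord : ordered.Perm (S.filter (fun c => decide (c ∈ pvPreferred))) := by
      rw [List.perm_ext_iff_of_nodup hord_nodup (hSnd.filter _)]
      intro c
      rw [hmem_ord c, List.mem_filter]
      constructor
      · intro h; exact ⟨h.2, by simpa using h.1⟩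
      · intro h; exact ⟨by simpa using h.2, h.1⟩
    exact (hperm_ord.append hperm_rem).trans (List.filter_append_perm _ S)
  · -- strict pairwise growth of the lexicographic key along ordered ++ remaining
    rw [List.pairwise_append]
    refine ⟨?_, ?_, ?_⟩
    · -- within ordered: strictly increasing rank (first key component)
      have hp := pv_rank_pairwise.filter (fun column => PySem.Set.contains S column)
      rw [← hordered] at hp
      refine hp.imp ?_
      intro a b hab
      rw [Prod.Lex.toLex_lt_toLex]
      exact Or.inl hab
    · -- within remaining: rank 25 on both sides, strictly increasing name
      have h1 : remaining.Pairwise (fun a b => a ≤ b) := PySem.List.sorted_pairwise _ _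
      have h2 : remaining.Nodup := by
        rw [hrem]; exact (PySem.List.sorted_perm _ _ _).symm.nodup (hSnd.filter _)
      refine (h1.and h2).imp_of_mem ?_
      intro a b ha hb hab
      rw [Prod.Lex.toLex_lt_toLex,
          pv_rank_of_not_mem a (hrem_sub a ha).2, pv_rank_of_not_mem b (hrem_sub b hb).2]
      exact Or.inr ⟨rfl, lt_of_le_of_ne hab.1 hab.2⟩
    · -- across the seam: every preferred rank < 25 = every non-preferred rank
      intro a ha b hb
      have hap : a ∈ pvPreferred := ((hmem_ord a).mp ha).1
      rw [Prod.Lex.toLex_lt_toLex, pv_rank_of_not_mem b (hrem_sub b hb).2]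
      exact Or.inl (pv_rank_lt_of_mem a hap)

-- ===== VERDICT (by name: the statement is the Claim_ definition above) =====
theorem ordered_columns_py_spec : Claim_equal_ordered_columns_py := by
  intro rows _
  unfold Spec_ordered_columns_py
  exact pv_main rows
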